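-- pv_equiv track=rewrite | github.com/unverifiedhashcode/LeetCodeProblems | Python/874. Walking Robot Simulation.py | moveForward
-- ===== SOURCE A (Python) =====
-- def moveForward(amt, currPos, dir, obstacles):
--     #multiple for loops would messier but faster
--     #optimize by adding a check if it moved at all before recalculating max dist
--     disp = 0
--     nextPos = [0,0]
--
--     for i in range(amt):
--         match dir:
--             case 'N':
--                 nextPos = [currPos[0],currPos[1]+1]
--             case 'S':
--                 nextPos = [currPos[0],currPos[1]-1]
--             case 'E':
--                 nextPos = [currPos[0]+1,currPos[1]]
--             case 'W':
--                 nextPos = [currPos[0]-1,currPos[1]]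
--         if tuple(nextPos) in obstacles:
--             return currPos
--         currPos = nextPos
--
--     return currPos
-- ===== SOURCE B (Python) =====
-- DELTAS = {'N': (0, 1), 'S': (0, -1), 'E': (1, 0), 'W': (-1, 0)}
--
--
-- def moveForward(amt, currPos, dir, obstacles):
--     """Walk up to amt steps in direction dir, stopping just before the first obstacle."""
--     if amt <= 0:
--         return currPos
--     dx, dy = DELTAS[dir]
--     x, y = currPos[0], currPos[1]
--     best = amt
--     for ox, oy in obstacles:
--         if dx == 0:
--             k = dy * (oy - y)
--             if ox == x and 1 <= k <= amt:
--                 best = min(best, k - 1)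
--         else:
--             k = dx * (ox - x)
--             if oy == y and 1 <= k <= amt:
--                 best = min(best, k - 1)
--     if best == 0:
--         return currPos
--     return [x + dx * best, y + dy * best]
-- ===== Notes on version B (the rewrite author's own statement) =====
-- stated objective: alternative
-- what changed: A simulates the walk cell by cell over amt steps; B computes the direction delta once and makes a single pass over the obstacles taking the minimum on-ray blocker distance, then returns the final cell by a closed-form displacement. Pre_ excludes directions outside NSEW with amt >= 1: A's match statement has no default and still returns a value there ([0,0], or currPos when (0,0) is an obstacle), while B's direction-table lookup raises KeyError.
-- outside the precondition, e.g. on moveForward(3, [5, 6], 'X', set()): A returns [0, 0], B raises KeyError; on moveForward(2, [5, 6], 'Q', {(0, 0)}): A returns [5, 6], B raises KeyError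
import Mathlib
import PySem

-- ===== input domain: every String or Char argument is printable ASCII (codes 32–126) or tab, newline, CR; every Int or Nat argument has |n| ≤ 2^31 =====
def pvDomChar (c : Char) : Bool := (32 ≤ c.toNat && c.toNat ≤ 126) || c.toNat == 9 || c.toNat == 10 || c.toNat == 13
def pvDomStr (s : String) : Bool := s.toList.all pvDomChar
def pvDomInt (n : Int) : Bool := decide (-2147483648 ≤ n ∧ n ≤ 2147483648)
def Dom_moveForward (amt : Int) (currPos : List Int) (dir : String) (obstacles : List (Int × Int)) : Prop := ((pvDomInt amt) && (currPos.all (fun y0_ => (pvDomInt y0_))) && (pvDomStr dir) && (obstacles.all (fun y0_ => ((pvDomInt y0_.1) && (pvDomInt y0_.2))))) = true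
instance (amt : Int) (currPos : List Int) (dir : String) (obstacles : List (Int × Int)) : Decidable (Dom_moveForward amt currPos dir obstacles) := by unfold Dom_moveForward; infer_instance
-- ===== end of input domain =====

-- B replaces A's step-by-step walk (amt iterations) by one pass over the obstacles computing
-- the distance to the nearest blocker on the ray (objective: alternative algorithm).


-- ===== PORT A =====
-- the for-loop with its early return; loop state is (currPos, nextPos) as in the Python.
-- currPos[i] is List.getD: exact under Pre_ (which rules out the IndexError inputs);
-- tuple(nextPos) is (nextPos[0], nextPos[1]) — nextPos always has exactly two elements.
def moveForwardLoop (dir : String) (obstacles : List (Int × Int)) :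
    Nat → List Int → List Int → List Int
  | 0, cur, _ => cur
  | n+1, cur, nxt0 =>
    let nxt :=
      if dir = "N" then [cur.getD 0 0, cur.getD 1 0 + 1]
      else if dir = "S" then [cur.getD 0 0, cur.getD 1 0 - 1]
      else if dir = "E" then [cur.getD 0 0 + 1, cur.getD 1 0]
      else if dir = "W" then [cur.getD 0 0 - 1, cur.getD 1 0]
      else nxt0
    if (nxt.getD 0 0, nxt.getD 1 0) ∈ obstacles then cur
    else moveForwardLoop dir obstacles n nxt nxt

def moveForward (amt : Int) (currPos : List Int) (dir : String) (obstacles : List (Int × Int)) : List Int :=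
  moveForwardLoop dir obstacles amt.toNat currPos [0, 0]

-- ===== PORT B =====
-- DELTAS[dir] raises KeyError outside "NSEW" (excluded by Pre_): the port returns [] there.
def moveForward_alt (amt : Int) (currPos : List Int) (dir : String) (obstacles : List (Int × Int)) : List Int :=
  let deltas : PySem.Dict String (Int × Int) :=
    PySem.Dict.ofList [("N", ((0:Int), (1:Int))), ("S", (0, -1)), ("E", (1, 0)), ("W", (-1, 0))]
  if amt ≤ 0 then currPos else
  match PySem.Dict.get? deltas dir with
  | none => []
  | some (dx, dy) =>
    let x := currPos.getD 0 0   -- currPos[0]: exact under Pre_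
    let y := currPos.getD 1 0
    let best := obstacles.foldl (fun best o =>
      if dx = 0 then
        let k := dy * (o.2 - y)
        if o.1 = x ∧ 1 ≤ k ∧ k ≤ amt then min best (k - 1) else best
      else
        let k := dx * (o.1 - x)
        if o.2 = y ∧ 1 ≤ k ∧ k ≤ amt then min best (k - 1) else best) amt
    if best = 0 then currPos
    else [x + dx * best, y + dy * best]

-- ===== PRECONDITION & SPEC =====
-- Pre_ excludes (a) the IndexError inputs (a compass direction with amt ≥ 1 reads currPos[0]
-- and currPos[1]) and (b) directions outside "NSEW" with amt ≥ 1: A's match statement has no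
-- default and still returns a value there ([0,0], or currPos when (0,0) is an obstacle),
-- while B's direction-table lookup raises KeyError.
def Pre_moveForward (amt : Int) (currPos : List Int) (dir : String) (obstacles : List (Int × Int)) : Prop :=
  1 ≤ amt → (dir ∈ (["N", "S", "E", "W"] : List String) ∧ 2 ≤ currPos.length)
instance (amt : Int) (currPos : List Int) (dir : String) (obstacles : List (Int × Int)) : Decidable (Pre_moveForward amt currPos dir obstacles) := by unfold Pre_moveForward; infer_instance
def pvWitness_moveForward : Int × List Int × String × (List (Int × Int)) := (3, [0, 4], "N", [(0, 7)])

def Spec_moveForward (amt : Int) (currPos : List Int) (dir : String) (obstacles : List (Int × Int)) (out : List Int) : Prop := out = moveForward_alt amt currPos dir obstacles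
instance (amt : Int) (currPos : List Int) (dir : String) (obstacles : List (Int × Int)) (out : List Int) : Decidable (Spec_moveForward amt currPos dir obstacles out) := by unfold Spec_moveForward; infer_instance

-- ===== CLAIM (what is proved, stated in full; the proofs are below) =====
def Claim_equal_moveForward : Prop := ∀ (amt : Int) (currPos : List Int) (dir : String) (obstacles : List (Int × Int)), Dom_moveForward amt currPos dir obstacles → Pre_moveForward amt currPos dir obstacles → Spec_moveForward amt currPos dir obstacles (moveForward amt currPos dir obstacles)

-- ===== LEMMAS AND PROOFS =====

-- number of free steps the walk takes: stops before the first obstacle hit, at most n steps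
def stepsFn (dx dy : Int) (obst : List (Int × Int)) : Nat → Int → Int → Nat
  | 0, _, _ => 0
  | n+1, x, y => if (x + dx, y + dy) ∈ obst then 0 else stepsFn dx dy obst n (x + dx) (y + dy) + 1

lemma stepsFn_le (dx dy : Int) (obst : List (Int × Int)) :
    ∀ (n : Nat) (x y : Int), stepsFn dx dy obst n x y ≤ n := by
  intro n
  induction n with
  | zero => intro x y; simp [stepsFn]
  | succ n ih =>
    intro x y
    simp only [stepsFn]
    split
    · omega
    · have := ih (x + dx) (y + dy); omega

lemma stepsFn_no_block (dx dy : Int) (obst : List (Int × Int)) :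
    ∀ (n : Nat) (x y : Int) (k : Nat), 1 ≤ k → k ≤ stepsFn dx dy obst n x y →
      (x + dx * k, y + dy * k) ∉ obst := by
  intro n
  induction n with
  | zero => intro x y k h1 h2; simp [stepsFn] at h2; omega
  | succ n ih =>
    intro x y k h1 h2
    simp only [stepsFn] at h2
    split at h2
    · omega
    · rename_i hnb
      rcases Nat.eq_or_lt_of_le h1 with h | h
      · subst h; simpa using hnb
      · have hk : (1:Nat) ≤ k - 1 := by omega
        have hk2 : k - 1 ≤ stepsFn dx dy obst n (x + dx) (y + dy) := by omega
        have hmem := ih (x + dx) (y + dy) (k - 1) hk hk2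
        have he : (x + dx + dx * ((k - 1 : Nat) : Int), y + dy + dy * ((k - 1 : Nat) : Int)) =
            (x + dx * k, y + dy * k) := by
          have hc : ((k - 1 : Nat) : Int) = (k : Int) - 1 := by omega
          rw [hc, Prod.mk.injEq]
          exact ⟨by ring, by ring⟩
        rw [he] at hmem
        exact hmem

lemma stepsFn_blocked (dx dy : Int) (obst : List (Int × Int)) :
    ∀ (n : Nat) (x y : Int), stepsFn dx dy obst n x y = n ∨
      (x + dx * (stepsFn dx dy obst n x y + 1), y + dy * (stepsFn dx dy obst n x y + 1)) ∈ obst := by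
  intro n
  induction n with
  | zero => intro x y; left; simp [stepsFn]
  | succ n ih =>
    intro x y
    simp only [stepsFn]
    split
    · rename_i hb
      right; simpa using hb
    · rcases ih (x + dx) (y + dy) with h | h
      · left; omega
      · right
        have he : (x + dx * (((stepsFn dx dy obst n (x+dx) (y+dy) + 1 : Nat) : Int) + 1),
                   y + dy * (((stepsFn dx dy obst n (x+dx) (y+dy) + 1 : Nat) : Int) + 1)) =
                  (x + dx + dx * ((stepsFn dx dy obst n (x+dx) (y+dy) : Int) + 1),
                   y + dy + dy * ((stepsFn dx dy obst n (x+dx) (y+dy) : Int) + 1)) := by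
          have hc : ((stepsFn dx dy obst n (x+dx) (y+dy) + 1 : Nat) : Int) =
              (stepsFn dx dy obst n (x+dx) (y+dy) : Int) + 1 := by omega
          rw [hc, Prod.mk.injEq]
          exact ⟨by ring, by ring⟩
        rw [he]
        exact h

-- A's loop, for a compass direction, walks stepsFn steps
lemma loop_eq_steps (dir : String) (obst : List (Int × Int)) (dx dy : Int)
    (hstep : ∀ (cur nxt0 : List Int),
      (if dir = "N" then [cur.getD 0 0, cur.getD 1 0 + 1]
       else if dir = "S" then [cur.getD 0 0, cur.getD 1 0 - 1]
       else if dir = "E" then [cur.getD 0 0 + 1, cur.getD 1 0]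
       else if dir = "W" then [cur.getD 0 0 - 1, cur.getD 1 0]
       else nxt0) = [cur.getD 0 0 + dx, cur.getD 1 0 + dy]) :
    ∀ (n : Nat) (cur nxt0 : List Int),
      moveForwardLoop dir obst n cur nxt0 =
        if stepsFn dx dy obst n (cur.getD 0 0) (cur.getD 1 0) = 0 then cur
        else [cur.getD 0 0 + dx * (stepsFn dx dy obst n (cur.getD 0 0) (cur.getD 1 0)),
              cur.getD 1 0 + dy * (stepsFn dx dy obst n (cur.getD 0 0) (cur.getD 1 0))] := by
  intro n
  induction n with
  | zero => intro cur nxt0; simp [moveForwardLoop, stepsFn]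
  | succ n ih =>
    intro cur nxt0
    rw [moveForwardLoop]
    simp only [hstep, List.getD_cons_zero, List.getD_cons_succ, stepsFn]
    split
    · simp
    · rw [ih]
      simp only [List.getD_cons_zero, List.getD_cons_succ]
      set s := stepsFn dx dy obst n (cur.getD 0 0 + dx) (cur.getD 1 0 + dy) with hs
      rw [if_neg (by omega : ¬ (s + 1 = 0))]
      by_cases h0 : s = 0
      · rw [if_pos h0, h0]
        norm_num
      · rw [if_neg h0]
        have hc : ((s + 1 : Nat) : Int) = (s : Int) + 1 := by omega
        rw [hc]
        simp only [List.cons.injEq, and_true]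
        exact ⟨by ring, by ring⟩

-- the foldl in B computes a min with these three characterising properties
lemma foldl_min_char (l : List (Int × Int)) (a : Int) (c : Int × Int → Prop) [DecidablePred c]
    (g : Int × Int → Int) :
    l.foldl (fun b o => if c o then min b (g o) else b) a ≤ a ∧
    (∀ o ∈ l, c o → l.foldl (fun b o => if c o then min b (g o) else b) a ≤ g o) ∧
    (l.foldl (fun b o => if c o then min b (g o) else b) a = a ∨
      ∃ o ∈ l, c o ∧ l.foldl (fun b o => if c o then min b (g o) else b) a = g o) := by
  induction l generalizing a with
  | nil => simp
  | cons h t ih =>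
    simp only [List.foldl_cons]
    by_cases hc : c h
    · rw [if_pos hc]
      obtain ⟨i1, i2, i3⟩ := ih (min a (g h))
      refine ⟨le_trans i1 (min_le_left _ _), ?_, ?_⟩
      · intro o ho hco
        rw [List.mem_cons] at ho
        rcases ho with ho | ho
        · subst ho; exact le_trans i1 (min_le_right _ _)
        · exact i2 o ho hco
      · rcases i3 with i3 | ⟨o, ho, hco, hg⟩
        · rcases le_total a (g h) with hle | hlt
          · left; rw [i3]; omega
          · right; exact ⟨h, by simp, hc, by rw [i3]; omega⟩
        · right; exact ⟨o, by simp [ho], hco, hg⟩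
    · rw [if_neg hc]
      obtain ⟨i1, i2, i3⟩ := ih a
      refine ⟨i1, ?_, ?_⟩
      · intro o ho hco
        rw [List.mem_cons] at ho
        rcases ho with ho | ho
        · subst ho; exact absurd hco hc
        · exact i2 o ho hco
      · rcases i3 with i3 | ⟨o, ho, hco, hg⟩
        · left; exact i3
        · right; exact ⟨o, by simp [ho], hco, hg⟩

-- the uniqueness argument: B's fold result equals A's step count
lemma best_eq_steps (dx dy : Int) (obst : List (Int × Int)) (x y amt r : Int)
    (hamt : 1 ≤ amt)
    (h1 : r ≤ amt)
    (h2 : ∀ k : Int, 1 ≤ k → k ≤ amt → (x + dx * k, y + dy * k) ∈ obst → r ≤ k - 1)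
    (h3 : r = amt ∨ ∃ k : Int, 1 ≤ k ∧ k ≤ amt ∧ (x + dx * k, y + dy * k) ∈ obst ∧ r = k - 1) :
    r = (stepsFn dx dy obst amt.toNat x y : Int) := by
  set s := stepsFn dx dy obst amt.toNat x y with hs
  have hsle : s ≤ amt.toNat := stepsFn_le dx dy obst amt.toNat x y
  have hub : r ≤ s := by
    by_cases hsn : s = amt.toNat
    · omega
    · rcases stepsFn_blocked dx dy obst amt.toNat x y with h | h
      · omega
      · have := h2 ((s:Int) + 1) (by omega) (by omega) h
        omega
  have hlb : (s:Int) ≤ r := by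
    rcases h3 with h | ⟨k, hk1, hk2, hkb, hkr⟩
    · omega
    · by_contra hc
      push_neg at hc
      have hks : k.toNat ≤ s := by omega
      have hnb := stepsFn_no_block dx dy obst amt.toNat x y k.toNat (by omega) hks
      rw [show ((k.toNat : Int)) = k by omega] at hnb
      exact hnb hkb
  omega

-- evaluating B at a compass direction (the lets of the port zeta-reduce)
lemma alt_eval (amt : Int) (currPos : List Int) (dir : String) (obstacles : List (Int × Int))
    (dx dy : Int) (hamt : ¬ amt ≤ 0)
    (hget : PySem.Dict.get? (PySem.Dict.ofList
      [("N", ((0:Int), (1:Int))), ("S", (0, -1)), ("E", (1, 0)), ("W", (-1, 0))]) dir = some (dx, dy)) :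
    moveForward_alt amt currPos dir obstacles =
      (if (obstacles.foldl (fun best o =>
            if dx = 0 then
              if o.1 = currPos.getD 0 0 ∧ 1 ≤ dy * (o.2 - currPos.getD 1 0) ∧ dy * (o.2 - currPos.getD 1 0) ≤ amt
              then min best (dy * (o.2 - currPos.getD 1 0) - 1) else best
            else
              if o.2 = currPos.getD 1 0 ∧ 1 ≤ dx * (o.1 - currPos.getD 0 0) ∧ dx * (o.1 - currPos.getD 0 0) ≤ amt
              then min best (dx * (o.1 - currPos.getD 0 0) - 1) else best) amt) = 0
       then currPos
       else [currPos.getD 0 0 + dx * (obstacles.foldl (fun best o =>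
            if dx = 0 then
              if o.1 = currPos.getD 0 0 ∧ 1 ≤ dy * (o.2 - currPos.getD 1 0) ∧ dy * (o.2 - currPos.getD 1 0) ≤ amt
              then min best (dy * (o.2 - currPos.getD 1 0) - 1) else best
            else
              if o.2 = currPos.getD 1 0 ∧ 1 ≤ dx * (o.1 - currPos.getD 0 0) ∧ dx * (o.1 - currPos.getD 0 0) ≤ amt
              then min best (dx * (o.1 - currPos.getD 0 0) - 1) else best) amt),
             currPos.getD 1 0 + dy * (obstacles.foldl (fun best o =>
            if dx = 0 then
              if o.1 = currPos.getD 0 0 ∧ 1 ≤ dy * (o.2 - currPos.getD 1 0) ∧ dy * (o.2 - currPos.getD 1 0) ≤ amt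
              then min best (dy * (o.2 - currPos.getD 1 0) - 1) else best
            else
              if o.2 = currPos.getD 1 0 ∧ 1 ≤ dx * (o.1 - currPos.getD 0 0) ∧ dx * (o.1 - currPos.getD 0 0) ≤ amt
              then min best (dx * (o.1 - currPos.getD 0 0) - 1) else best) amt)]) := by
  simp only [moveForward_alt]
  rw [if_neg hamt, hget]

-- main equality for a compass direction
lemma equal_of_delta (amt : Int) (currPos : List Int) (dir : String) (obstacles : List (Int × Int))
    (dx dy : Int) (hamt : 1 ≤ amt)
    (hdd : (dx = 0 ∧ dy * dy = 1) ∨ (dy = 0 ∧ dx * dx = 1))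
    (hstep : ∀ (cur nxt0 : List Int),
      (if dir = "N" then [cur.getD 0 0, cur.getD 1 0 + 1]
       else if dir = "S" then [cur.getD 0 0, cur.getD 1 0 - 1]
       else if dir = "E" then [cur.getD 0 0 + 1, cur.getD 1 0]
       else if dir = "W" then [cur.getD 0 0 - 1, cur.getD 1 0]
       else nxt0) = [cur.getD 0 0 + dx, cur.getD 1 0 + dy])
    (hget : PySem.Dict.get? (PySem.Dict.ofList
      [("N", ((0:Int), (1:Int))), ("S", (0, -1)), ("E", (1, 0)), ("W", (-1, 0))]) dir = some (dx, dy)) :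
    moveForward amt currPos dir obstacles = moveForward_alt amt currPos dir obstacles := by
  rw [moveForward, loop_eq_steps dir obstacles dx dy hstep,
    alt_eval amt currPos dir obstacles dx dy (by omega) hget]
  set x := currPos.getD 0 0 with hx
  set y := currPos.getD 1 0 with hy
  have hbs : (obstacles.foldl (fun best o =>
        if dx = 0 then
          if o.1 = x ∧ 1 ≤ dy * (o.2 - y) ∧ dy * (o.2 - y) ≤ amt
          then min best (dy * (o.2 - y) - 1) else best
        else
          if o.2 = y ∧ 1 ≤ dx * (o.1 - x) ∧ dx * (o.1 - x) ≤ amt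
          then min best (dx * (o.1 - x) - 1) else best) amt)
      = (stepsFn dx dy obstacles amt.toNat x y : Int) := by
    rcases hdd with ⟨hdx, hdy⟩ | ⟨hdy, hdx⟩
    · subst hdx
      have hred : (fun (best : Int) (o : Int × Int) =>
            if (0:Int) = 0 then
              if o.1 = x ∧ 1 ≤ dy * (o.2 - y) ∧ dy * (o.2 - y) ≤ amt
              then min best (dy * (o.2 - y) - 1) else best
            else
              if o.2 = y ∧ 1 ≤ (0:Int) * (o.1 - x) ∧ (0:Int) * (o.1 - x) ≤ amt
              then min best ((0:Int) * (o.1 - x) - 1) else best) =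
          (fun (best : Int) (o : Int × Int) =>
            if o.1 = x ∧ 1 ≤ dy * (o.2 - y) ∧ dy * (o.2 - y) ≤ amt
            then min best (dy * (o.2 - y) - 1) else best) := by
        funext b o; rw [if_pos rfl]
      rw [hred]
      obtain ⟨c1, c2, c3⟩ := foldl_min_char obstacles amt
        (fun o => o.1 = x ∧ 1 ≤ dy * (o.2 - y) ∧ dy * (o.2 - y) ≤ amt)
        (fun o => dy * (o.2 - y) - 1)
      apply best_eq_steps 0 dy obstacles x y amt _ hamt c1
      · intro k hk1 hk2 hkb
        have hkk : dy * ((y + dy * k) - y) = k := by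
          rw [show (y + dy * k) - y = dy * k by ring, show dy * (dy * k) = dy * dy * k by ring,
            hdy, one_mul]
        have := c2 (x + 0 * k, y + dy * k) hkb ⟨by ring, by rw [hkk]; exact hk1, by rw [hkk]; exact hk2⟩
        simp only at this
        rw [hkk] at this
        exact this
      · rcases c3 with h | ⟨o, ho, ⟨hc1, hc2, hc3⟩, hg⟩
        · left; exact h
        · right
          refine ⟨dy * (o.2 - y), hc2, hc3, ?_, by omega⟩
          have heo : (x + 0 * (dy * (o.2 - y)), y + dy * (dy * (o.2 - y))) = o := by
            rw [Prod.mk.injEq]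
            constructor
            · rw [← hc1]; ring
            · rw [show dy * (dy * (o.2 - y)) = dy * dy * (o.2 - y) by ring, hdy, one_mul]; ring
          rw [heo]
          exact ho
    · subst hdy
      have hdx0 : dx ≠ 0 := by intro h; rw [h] at hdx; omega
      have hred : (fun (best : Int) (o : Int × Int) =>
            if dx = 0 then
              if o.1 = x ∧ 1 ≤ (0:Int) * (o.2 - y) ∧ (0:Int) * (o.2 - y) ≤ amt
              then min best ((0:Int) * (o.2 - y) - 1) else best
            else
              if o.2 = y ∧ 1 ≤ dx * (o.1 - x) ∧ dx * (o.1 - x) ≤ amt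
              then min best (dx * (o.1 - x) - 1) else best) =
          (fun (best : Int) (o : Int × Int) =>
            if o.2 = y ∧ 1 ≤ dx * (o.1 - x) ∧ dx * (o.1 - x) ≤ amt
            then min best (dx * (o.1 - x) - 1) else best) := by
        funext b o; rw [if_neg hdx0]
      rw [hred]
      obtain ⟨c1, c2, c3⟩ := foldl_min_char obstacles amt
        (fun o => o.2 = y ∧ 1 ≤ dx * (o.1 - x) ∧ dx * (o.1 - x) ≤ amt)
        (fun o => dx * (o.1 - x) - 1)
      apply best_eq_steps dx 0 obstacles x y amt _ hamt c1
      · intro k hk1 hk2 hkb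
        have hkk : dx * ((x + dx * k) - x) = k := by
          rw [show (x + dx * k) - x = dx * k by ring, show dx * (dx * k) = dx * dx * k by ring,
            hdx, one_mul]
        have := c2 (x + dx * k, y + 0 * k) hkb ⟨by ring, by rw [hkk]; exact hk1, by rw [hkk]; exact hk2⟩
        simp only at this
        rw [hkk] at this
        exact this
      · rcases c3 with h | ⟨o, ho, ⟨hc1, hc2, hc3⟩, hg⟩
        · left; exact h
        · right
          refine ⟨dx * (o.1 - x), hc2, hc3, ?_, by omega⟩
          have heo : (x + dx * (dx * (o.1 - x)), y + 0 * (dx * (o.1 - x))) = o := by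
            rw [Prod.mk.injEq]
            constructor
            · rw [show dx * (dx * (o.1 - x)) = dx * dx * (o.1 - x) by ring, hdx, one_mul]; ring
            · rw [← hc1]; ring
          rw [heo]
          exact ho
  rw [hbs]
  by_cases h0 : stepsFn dx dy obstacles amt.toNat x y = 0
  · rw [h0]
    norm_num
  · have h0' : (stepsFn dx dy obstacles amt.toNat x y : Int) ≠ 0 := by exact_mod_cast h0
    rw [if_neg h0, if_neg h0']

-- ===== VERDICT (by name: the statement is the Claim_ definition above) =====
theorem moveForward_spec : Claim_equal_moveForward := by
  intro amt currPos dir obstacles _ hpre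
  show moveForward amt currPos dir obstacles = moveForward_alt amt currPos dir obstacles
  by_cases hamt : amt ≤ 0
  · have h0 : amt.toNat = 0 := by omega
    rw [moveForward, h0, moveForwardLoop, moveForward_alt, if_pos hamt]
  · push_neg at hamt
    obtain ⟨hdir, -⟩ := hpre (by omega)
    simp only [List.mem_cons, List.not_mem_nil, or_false] at hdir
    rcases hdir with hN | hS | hE | hW
    · subst hN
      exact equal_of_delta amt currPos "N" obstacles 0 1 hamt (by left; omega)
        (by intro cur nxt0; simp) (by decide)
    · subst hS
      exact equal_of_delta amt currPos "S" obstacles 0 (-1) hamt (by left; omega)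
        (by intro cur nxt0; simp [sub_eq_add_neg]) (by decide)
    · subst hE
      exact equal_of_delta amt currPos "E" obstacles 1 0 hamt (by right; omega)
        (by intro cur nxt0; simp) (by decide)
    · subst hW
      exact equal_of_delta amt currPos "W" obstacles (-1) 0 hamt (by right; omega)
        (by intro cur nxt0; simp [sub_eq_add_neg]) (by decide)
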